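-- pv_equiv track=rewrite | github.com/chenjienan/python-leetcode | OA/Microsoft/min_del_to_make_right_format.py | minDel2
-- ===== SOURCE A (Python) =====
-- import collections
--
-- def minDel2(s):
--     right = collections.Counter(s)
--     left = collections.Counter()
--     res = left['B'] + right['A']
--
--     for c in s:
--         left[c] += 1
--         right[c] -= 1
--         res = min(res, left['B'] + right['A'])
--     return res
-- ===== SOURCE B (Python) =====
-- def minDel2(s):
--     bcount = 0
--     res = 0
--     for c in s:
--         if c == 'B':
--             bcount += 1
--         elif c == 'A':
--             res = min(res + 1, bcount)
--     return res
-- ===== Notes on version B (the rewrite author's own statement) =====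
-- stated objective: simpler
-- what changed: Replaces the two-Counter prefix/suffix split evaluation with a one-pass DP over two plain integers using the recurrence res = min(res + 1, bcount) at each letter A, avoiding dict operations per character.
import Mathlib
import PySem

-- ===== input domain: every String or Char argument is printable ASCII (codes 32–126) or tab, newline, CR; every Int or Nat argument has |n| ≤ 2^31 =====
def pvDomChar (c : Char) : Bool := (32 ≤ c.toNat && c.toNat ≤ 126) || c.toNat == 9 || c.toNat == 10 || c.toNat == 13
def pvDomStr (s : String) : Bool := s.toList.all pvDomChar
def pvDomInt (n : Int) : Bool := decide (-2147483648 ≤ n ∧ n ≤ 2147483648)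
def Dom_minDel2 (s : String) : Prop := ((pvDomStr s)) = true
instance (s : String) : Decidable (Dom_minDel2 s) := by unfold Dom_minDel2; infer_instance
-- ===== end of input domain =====

-- B replaces the two-Counter prefix/suffix split scheme with a one-pass DP over two
-- plain integers (objective: simpler).

-- ===== PORT A =====
-- loop body of A: left[c] += 1; right[c] -= 1; res = min(res, left['B'] + right['A'])
def minDel2_stepA (st : PySem.Dict Char Int × PySem.Dict Char Int × Int) (c : Char) :
    PySem.Dict Char Int × PySem.Dict Char Int × Int :=
  let left := st.1.modify c 0 (· + 1)
  let right := st.2.1.modify c 0 (· - 1)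
  (left, right, min st.2.2 (left.getD 'B' 0 + right.getD 'A' 0))

def minDel2 (s : String) : Int :=
  let right := PySem.Dict.counter s.toList
  let left : PySem.Dict Char Int := PySem.Dict.empty
  let res : Int := left.getD 'B' 0 + right.getD 'A' 0
  (s.toList.foldl minDel2_stepA (left, right, res)).2.2

-- ===== PORT B =====
-- loop body of B: if c == 'B': bcount += 1 elif c == 'A': res = min(res + 1, bcount)
def minDel2_stepB (st : Int × Int) (c : Char) : Int × Int :=
  if c = 'B' then (st.1 + 1, st.2)
  else if c = 'A' then (st.1, min (st.2 + 1) st.1)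
  else st

def minDel2_alt (s : String) : Int :=
  (s.toList.foldl minDel2_stepB (0, 0)).2

-- ===== PRECONDITION & SPEC =====
def Spec_minDel2 (s : String) (out : Int) : Prop := out = minDel2_alt s
instance (s : String) (out : Int) : Decidable (Spec_minDel2 s out) := by unfold Spec_minDel2; infer_instance

-- ===== CLAIM (what is proved, stated in full; the proofs are below) =====
def Claim_equal_minDel2 : Prop := ∀ (s : String), Dom_minDel2 s → Spec_minDel2 s (minDel2 s)

-- ===== LEMMAS AND PROOFS =====

-- Invariant relating A's fold state to B's: with `rem` still to process, A's dicts
-- satisfy left['B'] = bcount and right['A'] = (# of 'A' in rem), and A's running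
-- minimum exceeds B's by exactly (# of 'A' in rem); B's res never exceeds bcount.
theorem minDel2_key (rem : List Char) :
    ∀ (left right : PySem.Dict Char Int) (b resA resB : Int),
      left.getD 'B' 0 = b →
      right.getD 'A' 0 = (rem.count 'A' : Int) →
      resA = resB + (rem.count 'A' : Int) →
      resB ≤ b →
      (rem.foldl minDel2_stepA (left, right, resA)).2.2
        = (rem.foldl minDel2_stepB (b, resB)).2 := by
  induction rem with
  | nil => intro _ _ _ _ _ hL _ hres _; simpa using hres
  | cons c t ih =>
    intro left right b resA resB hL hR hres hle
    simp only [List.foldl_cons]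
    have hcnt : (List.count 'A' (c :: t) : Int)
        = (t.count 'A' : Int) + (if c = 'A' then 1 else 0) := by
      rcases eq_or_ne c 'A' with h | h
      · simp [h, List.count_cons]
      · simp [List.count_cons, h, (by simpa [eq_comm] using h : ¬ 'A' = c)]
    by_cases hB : c = 'B'
    · subst hB
      have h1 : ((left.modify 'B' 0 (· + 1)).getD 'B' 0) = b + 1 := by
        simp [PySem.Dict.getD_modify, hL]
      have h2 : ((right.modify 'B' 0 (· - 1)).getD 'A' 0) = (t.count 'A' : Int) := by
        have : (List.count 'A' ('B' :: t) : Int) = (t.count 'A' : Int) := by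
          simp [hcnt]
        simp [PySem.Dict.getD_modify, hR, this]
      simp only [minDel2_stepA, minDel2_stepB, if_pos rfl]
      refine ih _ _ (b + 1) _ resB h1 h2 ?_ (by omega)
      have : (List.count 'A' ('B' :: t) : Int) = (t.count 'A' : Int) := by simp [hcnt]
      rw [h1, h2, hres, this]
      omega
    · by_cases hA : c = 'A'
      · subst hA
        have h1 : ((left.modify 'A' 0 (· + 1)).getD 'B' 0) = b := by
          simp [PySem.Dict.getD_modify, hL]
        have h2 : ((right.modify 'A' 0 (· - 1)).getD 'A' 0) = (t.count 'A' : Int) := by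
          have : (List.count 'A' ('A' :: t) : Int) = (t.count 'A' : Int) + 1 := by
            simp [hcnt]
          simp [PySem.Dict.getD_modify, hR, this]
        simp only [minDel2_stepA, minDel2_stepB, if_neg hB, if_pos rfl]
        refine ih _ _ b _ (min (resB + 1) b) h1 h2 ?_ (by omega)
        have : (List.count 'A' ('A' :: t) : Int) = (t.count 'A' : Int) + 1 := by
          simp [hcnt]
        rw [h1, h2, hres, this]
        omega
      · have h1 : ((left.modify c 0 (· + 1)).getD 'B' 0) = b := by
          simp [PySem.Dict.getD_modify, hL,
            (by simpa [eq_comm] using hB : ¬ 'B' = c)]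
        have h2 : ((right.modify c 0 (· - 1)).getD 'A' 0) = (t.count 'A' : Int) := by
          have : (List.count 'A' (c :: t) : Int) = (t.count 'A' : Int) := by
            simp [hcnt, hA]
          simp [PySem.Dict.getD_modify, hR, this,
            (by simpa [eq_comm] using hA : ¬ 'A' = c)]
        simp only [minDel2_stepA, minDel2_stepB, if_neg hB, if_neg hA]
        refine ih _ _ b _ resB h1 h2 ?_ hle
        have : (List.count 'A' (c :: t) : Int) = (t.count 'A' : Int) := by
          simp [hcnt, hA]
        rw [h1, h2, hres, this]
        omega

-- ===== VERDICT (by name: the statement is the Claim_ definition above) =====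
theorem minDel2_spec : Claim_equal_minDel2 := by
  intro s _
  unfold Spec_minDel2 minDel2 minDel2_alt
  refine minDel2_key s.toList _ _ 0 _ 0 (by simp) ?_ ?_ le_rfl
  · simp [PySem.Dict.getD_counter]
  · simp [PySem.Dict.getD_counter]
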